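-- pv_equiv track=rewrite | github.com/giordanoEnzo/HareSync | app/utils/formatar.py | remover_pontuacao
-- ===== SOURCE A (Python) =====
-- def remover_pontuacao(texto):
--     pontuacao = ".,;:!?()[]{}--\/*&=+-"
--     texto_minusculo = texto.lower()
--     texto_formatado = ''
--
--     for char in texto_minusculo:
--         if char not in pontuacao:
--             texto_formatado += char
--
--     return texto_formatado
-- ===== SOURCE B (Python) =====
-- def remover_pontuacao(texto):
--     t = texto.lower()
--     for p in ".,;:!?()[]{}--\/*&=+-":
--         t = t.replace(p, '')
--     return t
-- ===== Notes on version B (the rewrite author's own statement) =====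
-- stated objective: faster
-- what changed: Instead of A's single accumulation pass with a per-character membership test and repeated string concatenation, B makes one global str.replace deletion pass over the string for each punctuation character (staged passes keyed by the punctuation).
import Mathlib
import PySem

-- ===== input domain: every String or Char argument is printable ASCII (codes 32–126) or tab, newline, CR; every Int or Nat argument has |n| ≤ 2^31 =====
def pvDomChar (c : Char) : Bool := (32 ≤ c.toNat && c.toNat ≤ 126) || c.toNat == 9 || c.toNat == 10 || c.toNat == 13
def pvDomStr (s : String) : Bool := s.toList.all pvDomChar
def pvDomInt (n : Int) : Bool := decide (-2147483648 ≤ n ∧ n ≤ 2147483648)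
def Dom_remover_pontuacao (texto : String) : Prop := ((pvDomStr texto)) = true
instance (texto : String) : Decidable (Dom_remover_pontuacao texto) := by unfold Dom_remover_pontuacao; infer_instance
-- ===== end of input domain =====

-- B lowercases once and then runs one whole-string str.replace deletion pass per punctuation
-- character (staged passes keyed by the punctuation) instead of A's single accumulation loop
-- with a membership test; return value only, no side effects.

-- ===== PORT A =====
def remover_pontuacao (texto : String) : String :=
  let pontuacao : List Char := ".,;:!?()[]{}--\\/*&=+-".toList
  let texto_minusculo : List Char := (PySem.Str.lower texto).toList
  let texto_formatado : List Char :=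
    texto_minusculo.foldl (fun acc c => if !(pontuacao.contains c) then acc ++ [c] else acc) []
  String.ofList texto_formatado

-- ===== PORT B =====
def remover_pontuacao_alt (texto : String) : String :=
  let t := PySem.Str.lower texto
  ".,;:!?()[]{}--\\/*&=+-".toList.foldl
    (fun t p => PySem.Str.replace t (String.ofList [p]) "") t

-- ===== PRECONDITION & SPEC =====
def Spec_remover_pontuacao (texto : String) (out : String) : Prop := out = remover_pontuacao_alt texto
instance (texto : String) (out : String) : Decidable (Spec_remover_pontuacao texto out) := by unfold Spec_remover_pontuacao; infer_instance

-- ===== CLAIM (what is proved, stated in full; the proofs are below) =====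
def Claim_equal_remover_pontuacao : Prop := ∀ (texto : String), Dom_remover_pontuacao texto → Spec_remover_pontuacao texto (remover_pontuacao texto)

-- ===== LEMMAS AND PROOFS =====

-- deleting one character with replace is filtering it out
theorem replace_go_single (c : Char) (fuel : Nat) (l acc : List Char) (h : l.length ≤ fuel) :
    PySem.Chars.replace.go [c] [] fuel l acc = acc.reverse ++ l.filter (· ≠ c) := by
  induction fuel generalizing l acc with
  | zero =>
    have : l = [] := List.length_eq_zero_iff.mp (Nat.le_zero.mp h)
    subst this
    simp [PySem.Chars.replace.go]
  | succ n ih =>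
    cases l with
    | nil => simp [PySem.Chars.replace.go]
    | cons d t =>
      simp only [PySem.Chars.replace.go]
      by_cases hd : d = c
      · subst hd
        have hpre : List.isPrefixOf [d] (d :: t) = true := by
          simp [List.isPrefixOf]
        rw [if_pos hpre]
        simp only [List.length_cons] at h
        simp only [List.length_singleton, List.drop_succ_cons, List.drop_zero]
        rw [ih _ _ (by omega)]
        simp
      · have hpre : List.isPrefixOf [c] (d :: t) = true ↔ False := by
          simp [List.isPrefixOf]; intro h'; exact hd h'.symm
        rw [if_neg (by simp [hpre])]
        simp only [List.length_cons] at h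
        rw [ih _ _ (by omega)]
        simp [hd]

theorem replace_single (c : Char) (l : List Char) :
    PySem.Chars.replace l [c] [] = l.filter (· ≠ c) := by
  simp only [PySem.Chars.replace, List.isEmpty_cons, if_false, Bool.false_eq_true]
  exact replace_go_single c l.length l [] le_rfl

-- folding single-character deletions over a list of characters filters out all of them
theorem foldl_filter_ne (ps : List Char) (l : List Char) :
    ps.foldl (fun t p => t.filter (· ≠ p)) l = l.filter (fun c => !(ps.contains c)) := by
  induction ps generalizing l with
  | nil => simp
  | cons p ps ih =>
    simp only [List.foldl_cons, ih, List.filter_filter]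
    apply List.filter_congr
    intro c _
    by_cases h : c = p <;> simp [h]

-- ===== VERDICT (by name: the statement is the Claim_ definition above) =====
theorem remover_pontuacao_spec : Claim_equal_remover_pontuacao := by
  intro texto _
  show remover_pontuacao texto = remover_pontuacao_alt texto
  unfold remover_pontuacao remover_pontuacao_alt
  dsimp only
  rw [PySem.List.foldl_append_if_eq_filter, List.nil_append]
  -- turn B's string-level foldl into a list-level foldl of filters
  have hB : ∀ (ps : List Char) (s : String),
      (ps.foldl (fun t p => PySem.Str.replace t (String.ofList [p]) "") s).toList
        = ps.foldl (fun t p => t.filter (· ≠ p)) s.toList := by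
    intro ps
    induction ps with
    | nil => intro s; rfl
    | cons p ps ih =>
      intro s
      simp only [List.foldl_cons, ih, PySem.Str.toList_replace, String.toList_ofList]
      congr 1
      exact replace_single p s.toList
  apply String.toList_injective
  rw [hB, foldl_filter_ne]
  simp [String.toList_ofList]
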